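-- pv_equiv track=rewrite | github.com/CaueIwamoto/GrafosProj | GrafosProj.py | VerLacos
-- ===== SOURCE A (Python) =====
-- def VerLacos(Matriz): # Verifica se existem laços ou arestas múltiplas no grafo
--     lacos = []
--     Amultiplas = []
--
--     for linha in range(len(Matriz)):
--         for coluna in range(linha, len(Matriz)): # Duas estruturas de repetição para passar pelos itens da matriz
--             if linha == coluna and int(Matriz[linha][coluna]) > 0: # Se o valor da célula for maior que 0 ela é um laço
--                 lacos.append("v{0}".format (linha+1))
--             elif int(Matriz[linha][coluna]) > 1: # Se o valor da célula for maior que 1 ela é aresta multipla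
--                 Amultiplas.append("v{0} e v{1}".format (linha+1, coluna+1))
--
--     return lacos, Amultiplas
-- ===== SOURCE B (Python) =====
-- def VerLacos(Matriz):
--     n = len(Matriz)
--
--     def mult(vals, i, j):
--         # vals is the suffix Matriz[i][j:n]; recurse down it
--         if not vals:
--             return []
--         rest = mult(vals[1:], i, j + 1)
--         if int(vals[0]) > 1:
--             return ["v{0} e v{1}".format(i + 1, j + 1)] + rest
--         return rest
--
--     def go(rows, i):
--         # rows is the suffix Matriz[i:]; recurse down the rows
--         if not rows:
--             return [], []
--         lacos, amultiplas = go(rows[1:], i + 1)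
--         row = rows[0]
--         here = ["v{0}".format(i + 1)] if int(row[i]) > 0 else []
--         return here + lacos, mult(row[i + 1:n], i, i + 1) + amultiplas
--
--     return go(Matriz, 0)
-- ===== Notes on version B (the rewrite author's own statement) =====
-- stated objective: alternative
-- what changed: Replaces A's index-driven nested for-loops with structural recursion: a recursive descent over the row suffixes that assembles both result lists back-to-front by prepending, each row's multiple-edge labels coming from a recursive scan of the sliced upper part row[i+1:n] instead of an index range.
import Mathlib
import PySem

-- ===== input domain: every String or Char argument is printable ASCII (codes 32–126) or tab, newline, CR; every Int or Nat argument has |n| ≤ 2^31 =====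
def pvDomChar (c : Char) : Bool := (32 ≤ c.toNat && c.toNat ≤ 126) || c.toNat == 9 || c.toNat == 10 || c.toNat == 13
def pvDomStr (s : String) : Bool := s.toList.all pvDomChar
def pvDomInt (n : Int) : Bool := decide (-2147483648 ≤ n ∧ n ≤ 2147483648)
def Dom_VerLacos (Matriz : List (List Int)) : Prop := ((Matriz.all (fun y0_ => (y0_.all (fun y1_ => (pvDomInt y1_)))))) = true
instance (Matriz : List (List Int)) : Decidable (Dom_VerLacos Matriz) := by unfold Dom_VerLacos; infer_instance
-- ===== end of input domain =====

-- B replaces A's index-driven nested for-loops by structural recursion over the row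
-- suffixes, assembling both lists back-to-front by prepending; per-row multiple edges
-- come from a recursive scan of the slice row[i+1:n]. Alternative decomposition, same cost.


-- ===== PORT A =====
-- cell Matriz[i][j] (int() on an Int is the identity); pyGetD is used, Pre_ guarantees all reads are in range
def pvCell (Matriz : List (List Int)) (i j : Int) : Int :=
  PySem.List.pyGetD (PySem.List.pyGetD Matriz i []) j 0

def VerLacos (Matriz : List (List Int)) : List String × List String :=
  (PySem.List.pyRange 0 (Matriz.length : Int) 1).foldl (fun acc linha =>
    (PySem.List.pyRange linha (Matriz.length : Int) 1).foldl (fun acc2 coluna =>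
      if linha = coluna ∧ 0 < pvCell Matriz linha coluna then
        (acc2.1 ++ ["v" ++ PySem.Int.toStr (linha + 1)], acc2.2)
      else if 1 < pvCell Matriz linha coluna then
        (acc2.1, acc2.2 ++ ["v" ++ PySem.Int.toStr (linha + 1) ++ " e v" ++ PySem.Int.toStr (coluna + 1)])
      else acc2) acc) ([], [])

-- ===== PORT B =====
-- mult(vals, i, j): recursive scan of a suffix of row i, vals = row[j:n]
def pvMult (vals : List Int) (i j : Int) : List String :=
  match vals with
  | [] => []
  | v :: rest =>
    let r := pvMult rest i (j + 1)
    if 1 < v then ("v" ++ PySem.Int.toStr (i + 1) ++ " e v" ++ PySem.Int.toStr (j + 1)) :: r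
    else r

-- go(rows, i): recursive descent over the row suffix Matriz[i:]
def pvGo (n : Int) : List (List Int) → Int → List String × List String
  | [], _ => ([], [])
  | row :: rest, i =>
    let p := pvGo n rest (i + 1)
    ((if 0 < PySem.List.pyGetD row i 0 then ["v" ++ PySem.Int.toStr (i + 1)] else []) ++ p.1,
     pvMult (PySem.List.slice row (some (i + 1)) (some n)) i (i + 1) ++ p.2)

def VerLacos_alt (Matriz : List (List Int)) : List String × List String :=
  pvGo (Matriz.length : Int) Matriz 0

-- ===== PRECONDITION & SPEC =====
-- A reads Matriz[i][j] for every 0 ≤ i ≤ j < n, so it raises IndexError iff some row is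
-- shorter than the matrix; Pre_ excludes exactly those ragged inputs (A returns on all others).
def Pre_VerLacos (Matriz : List (List Int)) : Prop :=
  ∀ row ∈ Matriz, Matriz.length ≤ row.length
instance (Matriz : List (List Int)) : Decidable (Pre_VerLacos Matriz) := by unfold Pre_VerLacos; infer_instance
def pvWitness_VerLacos : List (List Int) := [[1, 2], [0, 0]]

def Spec_VerLacos (Matriz : List (List Int)) (out : List String × List String) : Prop := out = VerLacos_alt Matriz
instance (Matriz : List (List Int)) (out : List String × List String) : Decidable (Spec_VerLacos Matriz out) := by unfold Spec_VerLacos; infer_instance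

-- ===== CLAIM (what is proved, stated in full; the proofs are below) =====
def Claim_equal_VerLacos : Prop := ∀ (Matriz : List (List Int)), Dom_VerLacos Matriz → Pre_VerLacos Matriz → Spec_VerLacos Matriz (VerLacos Matriz)

-- ===== LEMMAS AND PROOFS =====

-- A's inner loop over indices all different from `linha` touches only the Amultiplas component.
theorem inner_off_diag (M : List (List Int)) (linha : Int) (l : List Int)
    (hl : ∀ j ∈ l, linha ≠ j) (acc : List String × List String) :
    l.foldl (fun acc2 coluna =>
      if linha = coluna ∧ 0 < pvCell M linha coluna then
        (acc2.1 ++ ["v" ++ PySem.Int.toStr (linha + 1)], acc2.2)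
      else if 1 < pvCell M linha coluna then
        (acc2.1, acc2.2 ++ ["v" ++ PySem.Int.toStr (linha + 1) ++ " e v" ++ PySem.Int.toStr (coluna + 1)])
      else acc2) acc
    = (acc.1, acc.2 ++ (l.filter (fun j => decide (1 < pvCell M linha j))).map
        (fun j => "v" ++ PySem.Int.toStr (linha + 1) ++ " e v" ++ PySem.Int.toStr (j + 1))) := by
  induction l generalizing acc with
  | nil => simp
  | cons j l ih =>
    have hne : linha ≠ j := hl j (by simp)
    simp only [List.foldl_cons, List.filter_cons]
    rw [if_neg (by exact fun h => hne h.1)]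
    by_cases h1 : 1 < pvCell M linha j
    · rw [if_pos h1, ih (fun k hk => hl k (by simp [hk]))]
      simp [h1]
    · rw [if_neg h1, ih (fun k hk => hl k (by simp [hk]))]
      simp [h1]

-- A's full inner loop (from the diagonal) appends the diagonal contribution and the upper-row contribution.
theorem inner_full (M : List (List Int)) (linha : Int) (hlt : linha < (M.length : Int))
    (acc : List String × List String) :
    (PySem.List.pyRange linha (M.length : Int) 1).foldl (fun acc2 coluna =>
      if linha = coluna ∧ 0 < pvCell M linha coluna then
        (acc2.1 ++ ["v" ++ PySem.Int.toStr (linha + 1)], acc2.2)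
      else if 1 < pvCell M linha coluna then
        (acc2.1, acc2.2 ++ ["v" ++ PySem.Int.toStr (linha + 1) ++ " e v" ++ PySem.Int.toStr (coluna + 1)])
      else acc2) acc
    = (acc.1 ++ (if 0 < pvCell M linha linha then ["v" ++ PySem.Int.toStr (linha + 1)] else []),
       acc.2 ++ ((PySem.List.pyRange (linha + 1) (M.length : Int) 1).filter
            (fun j => decide (1 < pvCell M linha j))).map
          (fun j => "v" ++ PySem.Int.toStr (linha + 1) ++ " e v" ++ PySem.Int.toStr (j + 1))) := by
  rw [PySem.List.pyRange_one_cons hlt, List.foldl_cons]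
  by_cases hd : 0 < pvCell M linha linha
  · rw [if_pos ⟨rfl, hd⟩,
      inner_off_diag M linha _ (fun j hj => by
        have := (PySem.List.mem_pyRange_one.mp hj).1; omega)]
    simp [hd]
  · have hd1 : ¬ 1 < pvCell M linha linha := by omega
    rw [if_neg (fun h => hd h.2), if_neg hd1,
      inner_off_diag M linha _ (fun j hj => by
        have := (PySem.List.mem_pyRange_one.mp hj).1; omega)]
    simp [hd]

-- B's pvMult on the slice row[j:n] is exactly the filtered upper-row contribution of row i.
theorem mult_eq_filter (row : List Int) (i : Int) (nn : Nat) (hn : nn ≤ row.length) :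
    ∀ (k jn : Nat), nn - jn = k →
    pvMult (PySem.List.slice row (some (jn : Int)) (some (nn : Int))) i (jn : Int)
      = ((PySem.List.pyRange (jn : Int) (nn : Int) 1).filter
            (fun j => decide (1 < PySem.List.pyGetD row j 0))).map
          (fun j => "v" ++ PySem.Int.toStr (i + 1) ++ " e v" ++ PySem.Int.toStr (j + 1)) := by
  intro k
  induction k with
  | zero =>
    intro jn hjn
    have hr : PySem.List.pyRange (jn : Int) (nn : Int) 1 = [] := by
      rw [PySem.List.pyRange_of_pos _ _ (by norm_num : (0:ℤ) < 1), if_neg (by omega)]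
      simp
    have hs0 : nn - jn = 0 := by omega
    rw [PySem.List.slice_natCast, hs0, hr]
    simp [pvMult]
  | succ k ih =>
    intro jn hjn
    have hlt : jn < nn := by omega
    have hlen : jn < row.length := by omega
    have h2 := PySem.List.slice_natCast row (jn + 1) nn
    push_cast at h2
    rw [PySem.List.slice_natCast, List.drop_eq_getElem_cons hlen,
      (by omega : nn - jn = (nn - (jn + 1)) + 1), List.take_succ_cons, ← h2]
    have hstep := ih (jn + 1) (by omega)
    push_cast at hstep
    have hget : PySem.List.pyGetD row (jn : Int) 0 = row[jn] := by
      rw [PySem.List.pyGetD_natCast]; exact List.getD_eq_getElem row 0 hlen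
    rw [PySem.List.pyRange_one_cons (by exact_mod_cast hlt)]
    simp only [pvMult, List.filter_cons, hget, hstep]
    by_cases h1 : 1 < row[jn]
    · rw [if_pos h1, if_pos (by simpa using h1)]
      simp
    · rw [if_neg h1, if_neg (by simpa using h1)]

-- B's recursion over the suffix Matriz[i:] computes the canonical two components over pyRange i n.
theorem go_eq_canonical (M : List (List Int)) (hpre : Pre_VerLacos M) :
    ∀ (rows : List (List Int)) (i : Nat), M.drop i = rows →
    pvGo (M.length : Int) rows (i : Int)
      = (((PySem.List.pyRange (i : Int) (M.length : Int) 1).filter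
            (fun t => decide (0 < pvCell M t t))).map
           (fun t => "v" ++ PySem.Int.toStr (t + 1)),
         (PySem.List.pyRange (i : Int) (M.length : Int) 1).flatMap (fun t =>
           ((PySem.List.pyRange (t + 1) (M.length : Int) 1).filter
               (fun j => decide (1 < pvCell M t j))).map
             (fun j => "v" ++ PySem.Int.toStr (t + 1) ++ " e v" ++ PySem.Int.toStr (j + 1)))) := by
  intro rows
  induction rows with
  | nil =>
    intro i hdrop
    have hge : M.length ≤ i := List.drop_eq_nil_iff.mp hdrop
    have hr : PySem.List.pyRange (i : Int) (M.length : Int) 1 = [] := by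
      rw [PySem.List.pyRange_of_pos _ _ (by norm_num : (0:ℤ) < 1), if_neg (by omega)]
      simp
    simp [pvGo, hr]
  | cons row rest ih =>
    intro i hdrop
    have hlen : i < M.length := by
      by_contra h
      rw [List.drop_eq_nil_of_le (by omega)] at hdrop
      exact absurd hdrop (by simp)
    have hds := (List.drop_eq_getElem_cons hlen).symm.trans hdrop
    have hrow : M[i] = row := (List.cons_eq_cons.mp hds).1
    have hdrop' : M.drop (i + 1) = rest := (List.cons_eq_cons.mp hds).2
    have hrowlen : M.length ≤ row.length := hpre row (hrow ▸ M.getElem_mem _)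
    have hgetM : PySem.List.pyGetD M (i : Int) [] = row := by
      rw [PySem.List.pyGetD_natCast, List.getD_eq_getElem M [] hlen, hrow]
    have hcell : ∀ j : Int, pvCell M (i : Int) j = PySem.List.pyGetD row j 0 := by
      intro j; unfold pvCell; rw [hgetM]
    have hstep := ih (i + 1) hdrop'
    have hmult := mult_eq_filter row (i : Int) M.length hrowlen (M.length - (i + 1)) (i + 1) rfl
    push_cast at hmult
    rw [PySem.List.pyRange_one_cons (by exact_mod_cast hlen)]
    simp only [pvGo, List.filter_cons, List.flatMap_cons, hmult, hcell]
    by_cases hd : 0 < PySem.List.pyGetD row (i : Int) 0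
    · rw [if_pos hd, if_pos (by simpa using hd)]
      push_cast at hstep
      simp [hstep]
    · rw [if_neg hd, if_neg (by simpa using hd)]
      push_cast at hstep
      simp [hstep]

-- A's outer loop over any sublist of indices < n accumulates exactly the canonical two components.
theorem outer_loop (M : List (List Int)) (l : List Int)
    (hl : ∀ i ∈ l, i < (M.length : Int)) (acc : List String × List String) :
    l.foldl (fun acc linha =>
      (PySem.List.pyRange linha (M.length : Int) 1).foldl (fun acc2 coluna =>
        if linha = coluna ∧ 0 < pvCell M linha coluna then
          (acc2.1 ++ ["v" ++ PySem.Int.toStr (linha + 1)], acc2.2)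
        else if 1 < pvCell M linha coluna then
          (acc2.1, acc2.2 ++ ["v" ++ PySem.Int.toStr (linha + 1) ++ " e v" ++ PySem.Int.toStr (coluna + 1)])
        else acc2) acc) acc
    = (acc.1 ++ (l.filter (fun i => decide (0 < pvCell M i i))).map
          (fun i => "v" ++ PySem.Int.toStr (i + 1)),
       acc.2 ++ l.flatMap (fun i =>
         ((PySem.List.pyRange (i + 1) (M.length : Int) 1).filter
             (fun j => decide (1 < pvCell M i j))).map
           (fun j => "v" ++ PySem.Int.toStr (i + 1) ++ " e v" ++ PySem.Int.toStr (j + 1)))) := by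
  induction l generalizing acc with
  | nil => simp
  | cons i l ih =>
    simp only [List.foldl_cons]
    rw [inner_full M i (hl i (by simp)), ih (fun k hk => hl k (by simp [hk]))]
    by_cases hd : 0 < pvCell M i i <;> simp [hd]

-- ===== VERDICT (by name: the statement is the Claim_ definition above) =====
theorem VerLacos_spec : Claim_equal_VerLacos := by
  intro M _ hpre
  unfold Spec_VerLacos VerLacos VerLacos_alt
  rw [outer_loop M _ (fun i hi => (PySem.List.mem_pyRange_one.mp hi).2) ([], [])]
  have := go_eq_canonical M hpre M 0 (by simp)
  simpa using this.symm
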